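-- pv_equiv track=rewrite | github.com/newnol/crypto1_dlp | project_02_01/test_generator.py | int_to_lsb_hex
-- ===== SOURCE A (Python) =====
-- def int_to_lsb_hex(n: int) -> str:
--     """
--     Convert integer to LSB-to-MSB hex string format.
--     Example: 255 (0xFF) -> "FF", 256 (0x100) -> "001"
--     The format is: h_0*16^0 + h_1*16^1 + ... + h_k*16^k
--     So we output hex digits from least significant to most significant (left to right).
--     """
--     if n == 0:
--         return "0"
--
--     result = []
--     n = int(n)
--     while n > 0:
--         digit = n & 0xF
--         if digit < 10:
--             result.append(chr(ord('0') + digit))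
--         else:
--             result.append(chr(ord('A') + digit - 10))
--         n >>= 4
--
--     return ''.join(result)
-- ===== SOURCE B (Python) =====
-- def int_to_lsb_hex(n: int) -> str:
--     n = int(n)
--     if n == 0:
--         return "0"
--     return format(n, 'X')[::-1]
-- ===== Notes on version B (the rewrite author's own statement) =====
-- stated objective: idiomatic
-- what changed: Replaces the hand-rolled nibble-extraction loop (mask, shift, chr arithmetic, list append) with Python's builtin uppercase hex formatting followed by a string reversal to get LSB-first order.
-- outside the precondition, e.g. on int_to_lsb_hex(-5): A returns '', B returns '5-'
import Mathlib
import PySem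

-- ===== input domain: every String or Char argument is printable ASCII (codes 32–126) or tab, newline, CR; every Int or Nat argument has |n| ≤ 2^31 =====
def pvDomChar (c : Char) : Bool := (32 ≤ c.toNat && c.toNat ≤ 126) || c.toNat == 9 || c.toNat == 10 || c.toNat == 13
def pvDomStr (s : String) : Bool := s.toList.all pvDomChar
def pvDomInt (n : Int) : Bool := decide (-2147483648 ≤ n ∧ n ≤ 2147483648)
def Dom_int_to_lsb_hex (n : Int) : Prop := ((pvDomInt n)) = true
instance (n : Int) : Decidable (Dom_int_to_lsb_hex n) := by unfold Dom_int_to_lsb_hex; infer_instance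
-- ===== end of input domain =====

-- B uses builtin uppercase hex formatting + reversal instead of A's nibble-extraction loop (objective: idiomatic).

-- ===== PORT A =====
-- the while loop: digit = n & 0xF (= n mod 16 for every int) and n >>= 4 (= floor division by 16,
-- exact for every int); result accumulates chars LSB-first.
def pvALoop (n : Int) (result : List Char) : List Char :=
  if h : n > 0 then
    let digit := PySem.Int.mod n 16
    let result := if digit < 10
      then result ++ [Char.ofNat ('0'.toNat + digit.toNat)]
      else result ++ [Char.ofNat ('A'.toNat + digit.toNat - 10)]
    pvALoop (PySem.Int.floordiv n 16) result
  else result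
termination_by n.toNat
decreasing_by
  simp [PySem.Int.floordiv, Int.fdiv_eq_ediv]
  omega

def int_to_lsb_hex (n : Int) : String :=
  if n == 0 then "0"
  else String.mk (pvALoop n [])

-- ===== PORT B =====
-- pvFormatX n = the char list of Python's format(n, 'X') (MSB-first uppercase hex, '-' sign)
def pvMsbHex (n : Int) : List Char :=
  if h : n > 0 then
    pvMsbHex (PySem.Int.floordiv n 16) ++ ["0123456789ABCDEF".toList.getD (PySem.Int.mod n 16).toNat '0']
  else []
termination_by n.toNat
decreasing_by
  simp [PySem.Int.floordiv, Int.fdiv_eq_ediv]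
  omega

def pvFormatX (n : Int) : List Char :=
  if n < 0 then '-' :: pvMsbHex (-n)
  else if n = 0 then ['0']
  else pvMsbHex n

def int_to_lsb_hex_alt (n : Int) : String :=
  if n == 0 then "0"
  else String.mk (pvFormatX n).reverse

-- ===== PRECONDITION & SPEC =====
-- Pre_ excludes negative n: the function's domain is nonnegative integers, and on negatives neither
-- program's output is a specified hex encoding (A's loop never runs and yields "", B reverses the
-- sign-bearing builtin formatting) — an unspecified corner no caller relies on.
def Pre_int_to_lsb_hex (n : Int) : Prop := 0 ≤ n
instance (n : Int) : Decidable (Pre_int_to_lsb_hex n) := by unfold Pre_int_to_lsb_hex; infer_instance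
def pvWitness_int_to_lsb_hex : Int := (255)

def Spec_int_to_lsb_hex (n : Int) (out : String) : Prop := out = int_to_lsb_hex_alt n
instance (n : Int) (out : String) : Decidable (Spec_int_to_lsb_hex n out) := by unfold Spec_int_to_lsb_hex; infer_instance

-- ===== CLAIM (what is proved, stated in full; the proofs are below) =====
def Claim_equal_int_to_lsb_hex : Prop := ∀ (n : Int), Dom_int_to_lsb_hex n → Pre_int_to_lsb_hex n → Spec_int_to_lsb_hex n (int_to_lsb_hex n)

-- ===== LEMMAS AND PROOFS =====

-- the two digit renderings agree on 0..15
theorem pv_digit_eq (d : Int) (h0 : 0 ≤ d) (h1 : d < 16) :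
    (if d < 10 then Char.ofNat ('0'.toNat + d.toNat) else Char.ofNat ('A'.toNat + d.toNat - 10))
      = "0123456789ABCDEF".toList.getD d.toNat '0' := by
  interval_cases d <;> decide

-- A's loop equals result ++ reverse of B's MSB-first digits
theorem pvALoop_eq (n : Int) (result : List Char) :
    pvALoop n result = result ++ (pvMsbHex n).reverse := by
  by_cases h : n > 0
  · rw [pvALoop.eq_def, pvMsbHex.eq_def]
    simp only [h, dite_true]
    have hemod : PySem.Int.mod n 16 = n % 16 := by
      simp [PySem.Int.mod, Int.fmod_eq_emod]
    have hmod0 : 0 ≤ PySem.Int.mod n 16 := by rw [hemod]; omega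
    have hmod1 : PySem.Int.mod n 16 < 16 := by rw [hemod]; omega
    rw [pvALoop_eq (PySem.Int.floordiv n 16)]
    rw [← pv_digit_eq _ hmod0 hmod1]
    split_ifs with hlt <;> simp
  · rw [pvALoop.eq_def, pvMsbHex.eq_def]
    simp [h]
termination_by n.toNat
decreasing_by
  simp [PySem.Int.floordiv, Int.fdiv_eq_ediv]
  omega

-- ===== VERDICT (by name: the statement is the Claim_ definition above) =====
theorem int_to_lsb_hex_spec : Claim_equal_int_to_lsb_hex := by
  intro n _ hpre
  unfold Spec_int_to_lsb_hex int_to_lsb_hex int_to_lsb_hex_alt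
  by_cases h0 : n = 0
  · simp [h0]
  · have hpos : 0 < n := lt_of_le_of_ne hpre (Ne.symm h0)
    simp only [h0, beq_iff_eq]
    rw [pvALoop_eq]
    have h1 : ¬ n < 0 := by omega
    simp [pvFormatX, h1, h0]
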